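-- pv_equiv track=rewrite | github.com/nightstaker/AISE | src/aise/runtime/integration_probe.py | _glob_substring_keys
-- ===== SOURCE A (Python) =====
-- def _glob_substring_keys(glob: str) -> list[str]:
--     cut = glob
--     for ch in ("*", "?", "[", "{"):
--         idx = cut.find(ch)
--         if idx >= 0:
--             cut = cut[:idx]
--     cut = cut.rstrip("/")
--     out: list[str] = []
--     if cut:
--         out.append(cut)
--     if glob and glob not in out:
--         out.append(glob)
--     return out or [glob]
-- ===== SOURCE B (Python) =====
-- def _glob_substring_keys(glob: str) -> list[str]:
--     # One right-to-left pass builds the rstripped literal prefix directly: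
--     # a metacharacter discards everything accumulated to its right, and a '/'
--     # with an empty accumulator is absorbed; then a closed-form return.
--     acc = []  # reversed literal prefix of the part scanned so far
--     for c in reversed(glob):
--         if c in "*?[{":
--             acc = []
--         elif c == "/" and not acc:
--             pass
--         else:
--             acc.append(c)
--     cut = "".join(reversed(acc))
--     return [cut, glob] if cut and cut != glob else [glob]
-- ===== Notes on version B (the rewrite author's own statement) =====
-- stated objective: alternative
-- what changed: Replaces A's four progressive find/truncate passes plus rstrip plus conditional list mutation with a single right-to-left pass whose accumulator holds the reversed literal prefix (a metacharacter clears it, slashes with empty accumulator are absorbed, so rstrip is fused in) and a closed-form return expression instead of append/fallback logic.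
import Mathlib
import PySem

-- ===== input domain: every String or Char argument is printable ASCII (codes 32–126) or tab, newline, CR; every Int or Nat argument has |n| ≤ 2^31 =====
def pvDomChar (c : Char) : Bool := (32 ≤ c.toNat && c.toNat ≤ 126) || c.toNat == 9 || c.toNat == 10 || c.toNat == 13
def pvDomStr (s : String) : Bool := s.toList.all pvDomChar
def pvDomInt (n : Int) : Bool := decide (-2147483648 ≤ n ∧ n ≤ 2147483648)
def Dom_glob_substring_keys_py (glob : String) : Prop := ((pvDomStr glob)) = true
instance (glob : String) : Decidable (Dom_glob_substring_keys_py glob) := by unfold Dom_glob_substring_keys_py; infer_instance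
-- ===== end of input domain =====

-- ===== PORT A =====
-- B replaces the staged find/truncate/rstrip/append passes by one recursion with a closed-form return; objective: alternative.
-- Python s.rstrip("/") has no PySem primitive; ported by hand: drop trailing '/' characters — exact,
-- since rstrip with a one-character set removes exactly the maximal trailing run of that character.
def pyRstripSlash (s : String) : String :=
  String.ofList ((s.toList.reverse.dropWhile (fun c => c == '/')).reverse)

-- body of A's loop: idx = cut.find(ch); if idx >= 0: cut = cut[:idx]
def pvTruncA (cut ch : String) : String :=
  let idx := PySem.Str.find cut ch
  if 0 ≤ idx then PySem.Str.slice cut none (some idx) else cut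

-- literal transliteration of A
def glob_substring_keys_py (glob : String) : List String :=
  let cut := glob
  let cut := ["*", "?", "[", "{"].foldl pvTruncA cut
  let cut := pyRstripSlash cut
  let out : List String := []
  let out := if cut ≠ "" then out ++ [cut] else out
  let out := if glob ≠ "" ∧ glob ∉ out then out ++ [glob] else out
  if out ≠ [] then out else [glob]

-- ===== PORT B =====
-- body of B's loop over reversed(glob): acc holds the reversed literal prefix so far
def pvStepB (acc : List Char) (c : Char) : List Char :=
  if c ∈ ['*', '?', '[', '{'] then []
  else if c == '/' ∧ acc = [] then acc
  else acc ++ [c]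

-- transliteration of B: fold over reversed(glob), join reversed acc, closed-form return
def glob_substring_keys_py_alt (glob : String) : List String :=
  let acc := glob.toList.reverse.foldl pvStepB []
  let cut := String.ofList acc.reverse
  if cut ≠ "" ∧ cut ≠ glob then [cut, glob] else [glob]

-- ===== PRECONDITION & SPEC =====
def Spec_glob_substring_keys_py (glob : String) (out : List String) : Prop := out = glob_substring_keys_py_alt glob
instance (glob : String) (out : List String) : Decidable (Spec_glob_substring_keys_py glob out) := by unfold Spec_glob_substring_keys_py; infer_instance

-- ===== CLAIM (what is proved, stated in full; the proofs are below) =====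
def Claim_equal_glob_substring_keys_py : Prop := ∀ (glob : String), Dom_glob_substring_keys_py glob → Spec_glob_substring_keys_py glob (glob_substring_keys_py glob)

-- ===== LEMMAS AND PROOFS =====

-- proof helper: B's fold, read as structural recursion on the string (rightmost-first)
def pvLiteralB : List Char → List Char
  | [] => []
  | c :: s =>
    if c ∈ ['*', '?', '[', '{'] then []
    else
      let rest := pvLiteralB s
      if c == '/' ∧ rest = [] then [] else c :: rest

-- B's left fold over the reversed list computes pvLiteralB, reversed
theorem pv_foldB_eq (l : List Char) :
    l.reverse.foldl pvStepB [] = (pvLiteralB l).reverse := by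
  induction l with
  | nil => simp [pvLiteralB]
  | cons c t ih =>
    rw [List.reverse_cons, List.foldl_append, ih]
    simp only [List.foldl_cons, List.foldl_nil, pvStepB, pvLiteralB]
    by_cases hm : c ∈ ['*', '?', '[', '{']
    · simp [hm]
    · by_cases hc : c = '/' ∧ pvLiteralB t = []
      · simp [hm, hc, hc.2]
      · simp [hm, hc]

-- take up to the first index whose element fails p equals takeWhile p
theorem pv_take_eq_takeWhile {α : Type} (p : α → Bool) (l : List α) (k : Nat)
    (h1 : ∀ i, i < k → ∀ x, l[i]? = some x → p x = true)
    (h2 : ∀ x, l[k]? = some x → p x = false) :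
    l.take k = l.takeWhile p := by
  induction l generalizing k with
  | nil => simp
  | cons a t ih =>
    cases k with
    | zero =>
      have := h2 a (by simp)
      simp [this]
    | succ k =>
      have ha := h1 0 (by omega) a (by simp)
      rw [List.take_succ_cons, List.takeWhile_cons, ha]
      simp only []
      congr 1
      exact ih k (fun i hi x hx => h1 (i + 1) (by omega) x (by simpa using hx))
        (fun x hx => h2 x (by simpa using hx))

-- a single char occurs at index i iff [c] is a prefix of the drop
theorem pv_singleton_prefix_drop (c : Char) (l : List Char) (i : Nat) :
    [c] <+: l.drop i ↔ l[i]? = some c := by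
  rw [← List.head?_drop]
  constructor
  · rintro ⟨t, ht⟩; simp [← ht]
  · intro h
    cases hd : l.drop i with
    | nil => simp [hd] at h
    | cons x t => simp [hd] at h; exact ⟨t, by simp [h]⟩

-- one pass of A's loop: truncating at the first occurrence of c is takeWhile (· ≠ c)
theorem pv_truncOne (s ch : String) (c : Char) (hch : ch.toList = [c]) :
    (pvTruncA s ch).toList = s.toList.takeWhile (fun x => !(x == c)) := by
  unfold pvTruncA
  simp only [PySem.Str.find_eq, hch]
  by_cases h : 0 ≤ PySem.Chars.find s.toList [c]
  · rw [if_pos h, PySem.Str.toList_slice,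
      PySem.Chars.slice_eq_listSlice, PySem.List.slice_to _ h]
    obtain ⟨hpre, hmin⟩ := PySem.Chars.find_spec h
    apply pv_take_eq_takeWhile
    · intro i hi x hx
      have : ¬ [c] <+: s.toList.drop i := hmin i hi
      rw [pv_singleton_prefix_drop] at this
      simp only [Bool.not_eq_true']
      by_cases hxc : x = c
      · subst hxc; exact absurd hx this
      · simp [hxc]
    · intro x hx
      rw [pv_singleton_prefix_drop] at hpre
      rw [hpre] at hx
      simp at hx
      simp [hx]
  · rw [if_neg h]
    have h1 : PySem.Chars.find s.toList [c] = -1 := by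
      have := PySem.Chars.neg_one_le_find s.toList [c]
      omega
    rw [PySem.Chars.find_eq_neg_one_iff, List.singleton_infix_iff] at h1
    symm
    rw [List.takeWhile_eq_self_iff]
    intro x hx
    by_cases hxc : x = c
    · exact absurd (hxc ▸ hx) h1
    · simp [hxc]

-- A's four passes compute takeWhile (not a metachar)
theorem pv_cut_eq (glob : String) :
    (["*", "?", "[", "{"].foldl pvTruncA glob).toList
      = glob.toList.takeWhile (fun c => !(c ∈ ['*', '?', '[', '{'] : Bool)) := by
  simp only [List.foldl_cons, List.foldl_nil]
  rw [pv_truncOne _ "{" '{' (by decide), pv_truncOne _ "[" '[' (by decide),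
    pv_truncOne _ "?" '?' (by decide), pv_truncOne _ "*" '*' (by decide)]
  rw [List.takeWhile_takeWhile, List.takeWhile_takeWhile, List.takeWhile_takeWhile]
  congr 1
  funext c
  simp only [List.mem_cons, List.not_mem_nil, or_false]
  by_cases h1 : c = '*' <;> by_cases h2 : c = '?' <;> by_cases h3 : c = '[' <;>
    by_cases h4 : c = '{' <;> simp [h1, h2, h3, h4]

-- dropping trailing slashes from a cons: absorb c='/' iff the rest strips to []
theorem pv_rstrip_cons (c : Char) (xs : List Char) :
    ((c :: xs).reverse.dropWhile (fun x => x == '/')).reverse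
      = (if c == '/' ∧ (xs.reverse.dropWhile (fun x => x == '/')).reverse = [] then []
         else c :: (xs.reverse.dropWhile (fun x => x == '/')).reverse) := by
  rw [List.reverse_cons, List.dropWhile_append]
  by_cases h : (xs.reverse.dropWhile (fun x => x == '/')) = []
  · simp only [h, List.isEmpty_nil, if_true, List.reverse_nil, true_and]
    by_cases hc : c = '/'
    · simp [hc, List.dropWhile]
    · have hcf : (c == '/') = false := by simp [hc]
      simp [List.dropWhile, hcf]
  · have hne : ((xs.reverse.dropWhile (fun x => x == '/')).reverse) ≠ [] := by
      simpa using h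
    simp [h, hne]

-- B's recursion computes rstrip-slash of the takeWhile prefix
theorem pv_literalB_eq (l : List Char) :
    pvLiteralB l
      = ((l.takeWhile (fun c => !(c ∈ ['*', '?', '[', '{'] : Bool))).reverse.dropWhile
          (fun x => x == '/')).reverse := by
  induction l with
  | nil => simp [pvLiteralB]
  | cons c t ih =>
    rw [List.takeWhile_cons]
    by_cases hm : c ∈ ['*', '?', '[', '{']
    · simp [pvLiteralB, hm]
    · simp only [hm, Bool.not_eq_true', decide_eq_false_iff_not, not_false_iff,
        decide_eq_true_eq, if_pos, pvLiteralB, if_neg hm]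
      rw [pv_rstrip_cons, ← ih]
      by_cases hc : (c == '/') ∧ pvLiteralB t = [] <;> simp [hc]

-- the two cut strings agree
theorem pv_cutStr_eq (glob : String) :
    pyRstripSlash (["*", "?", "[", "{"].foldl pvTruncA glob)
      = String.ofList (pvLiteralB glob.toList) := by
  unfold pyRstripSlash
  rw [pv_cut_eq, pv_literalB_eq]

-- ===== VERDICT (by name: the statement is the Claim_ definition above) =====
theorem glob_substring_keys_py_spec : Claim_equal_glob_substring_keys_py := by
  intro glob _
  unfold Spec_glob_substring_keys_py glob_substring_keys_py glob_substring_keys_py_alt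
  simp only [pv_foldB_eq, List.reverse_reverse, pv_cutStr_eq]
  set cut := String.ofList (pvLiteralB glob.toList) with hcut
  by_cases h1 : cut = ""
  · -- cut empty: A's out = [glob] if glob ≠ "" else []; B: [glob]
    by_cases h2 : glob = "" <;> simp [h1, h2]
  · -- cut nonempty
    by_cases h2 : cut = glob
    · have hg : glob ≠ "" := fun h => h1 (h2.trans h)
      simp [h2, hg]
    · by_cases h3 : glob = ""
      · exfalso; apply h1; rw [hcut, h3]; decide
      · simp [h1, h2, h3, Ne.symm h2]
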